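-- pv_equiv track=rewrite | github.com/bgithub1/volgrid | volgrid/multi_dropdown.py | _symbol_list_to_dropdown_dict
-- ===== SOURCE A (Python) =====
-- def _symbol_list_to_dropdown_dict(symbol_list):
--     dict_choices = {}
--     for symbol in symbol_list:
--         commod = symbol[0:-3]
--         month = symbol[-3]
--         if commod not in dict_choices:
--             dict_choices[commod] = [month]
--         else:
--             if month not in dict_choices[commod]:
--                 dict_choices[commod].extend(month)
--     return dict_choices
-- ===== SOURCE B (Python) =====
-- def _symbol_list_to_dropdown_dict(symbol_list):
--     groups = {}
--     for symbol in symbol_list: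
--         groups.setdefault(symbol[0:-3], []).append(symbol[-3])
--     return {commod: list(dict.fromkeys(months)) for commod, months in groups.items()}
-- ===== Notes on version B (the rewrite author's own statement) =====
-- stated objective: alternative
-- what changed: Replaces the single-pass membership-checked accumulation with a two-pass scheme: first group all month chars per prefix with duplicates kept (setdefault/append), then order-preserving dedup of each value list with dict.fromkeys.
import Mathlib
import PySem

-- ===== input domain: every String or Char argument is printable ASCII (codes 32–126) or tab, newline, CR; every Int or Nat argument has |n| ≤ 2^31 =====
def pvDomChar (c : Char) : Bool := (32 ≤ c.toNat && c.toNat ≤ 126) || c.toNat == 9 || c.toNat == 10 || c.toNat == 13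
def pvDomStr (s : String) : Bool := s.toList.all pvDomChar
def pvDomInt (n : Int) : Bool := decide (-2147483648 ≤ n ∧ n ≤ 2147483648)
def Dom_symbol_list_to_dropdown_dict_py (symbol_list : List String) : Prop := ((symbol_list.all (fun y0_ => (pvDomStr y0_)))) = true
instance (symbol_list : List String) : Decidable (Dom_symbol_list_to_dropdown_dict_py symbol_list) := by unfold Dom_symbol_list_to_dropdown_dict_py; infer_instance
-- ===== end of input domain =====

-- B replaces A's one-pass membership-checked accumulation by two passes (group all months per prefix, then order-preserving dedup of each value list); alternative decomposition, same cost.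


-- ===== PORT A =====
-- one-pass accumulation: insert [month] for a new prefix, append month if not yet present
def symbol_list_to_dropdown_dict_py (symbol_list : List String) : List (String × List String) :=
  (symbol_list.foldl (fun dict_choices symbol =>
    let commod := PySem.Str.slice symbol (some 0) (some (-3))
    match PySem.Str.pyGet? symbol (-3) with
    | none => dict_choices  -- IndexError in Python; excluded by Pre_
    | some mc =>
      let month := String.ofList [mc]  -- Python s[-3] is a 1-char string
      match dict_choices.get? commod with
      | none => dict_choices.insert commod [month]
      | some ms => if month ∈ ms then dict_choices else dict_choices.insert commod (ms ++ [month])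
    ) PySem.Dict.empty).items

-- ===== PORT B =====
-- B's two passes: group with duplicates kept, then order-preserving dedup of each value list
def symbol_list_to_dropdown_dict_py_alt (symbol_list : List String) : List (String × List String) :=
  let groups := symbol_list.foldl (fun groups symbol =>
    match PySem.Str.pyGet? symbol (-3) with
    | none => groups  -- IndexError in Python; excluded by Pre_
    | some mc =>
      groups.modify (PySem.Str.slice symbol (some 0) (some (-3))) [] (fun ms => ms ++ [String.ofList [mc]])
    ) PySem.Dict.empty
  groups.items.map (fun p => (p.1, PySem.List.dedup p.2))

-- ===== PRECONDITION & SPEC =====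
-- Pre_ excludes symbols shorter than 3 characters, on which Python A raises IndexError at symbol[-3]
def Pre_symbol_list_to_dropdown_dict_py (symbol_list : List String) : Prop :=
  ∀ s ∈ symbol_list, 3 ≤ s.toList.length
instance (symbol_list : List String) : Decidable (Pre_symbol_list_to_dropdown_dict_py symbol_list) := by unfold Pre_symbol_list_to_dropdown_dict_py; infer_instance
def pvWitness_symbol_list_to_dropdown_dict_py : List String := ["CLZ21", "CLF21", "CLZ21", "NGZ21"]
def Spec_symbol_list_to_dropdown_dict_py (symbol_list : List String) (out : List (String × List String)) : Prop := out = symbol_list_to_dropdown_dict_py_alt symbol_list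
instance (symbol_list : List String) (out : List (String × List String)) : Decidable (Spec_symbol_list_to_dropdown_dict_py symbol_list out) := by unfold Spec_symbol_list_to_dropdown_dict_py; infer_instance

-- ===== CLAIM (what is proved, stated in full; the proofs are below) =====
def Claim_equal_symbol_list_to_dropdown_dict_py : Prop := ∀ (symbol_list : List String), Dom_symbol_list_to_dropdown_dict_py symbol_list → Pre_symbol_list_to_dropdown_dict_py symbol_list → Spec_symbol_list_to_dropdown_dict_py symbol_list (symbol_list_to_dropdown_dict_py symbol_list)

-- ===== LEMMAS AND PROOFS =====

-- value-wise dedup of a dict, the bridge between the two folds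
def pvMapDedup (d : PySem.Dict String (List String)) : PySem.Dict String (List String) :=
  PySem.Dict.mk (d.items.map (fun p => (p.1, PySem.List.dedup p.2)))

theorem pvMapDedup_get? (d : PySem.Dict String (List String)) (k : String) :
    (pvMapDedup d).get? k = (d.get? k).map PySem.List.dedup := by
  simp only [pvMapDedup, PySem.Dict.get?, List.find?_map, Function.comp_def]
  cases List.find? (fun p => p.1 == k) d.items <;> rfl

theorem pvMapDedup_keys (d : PySem.Dict String (List String)) :
    (pvMapDedup d).keys = d.keys := by
  simp only [pvMapDedup, PySem.Dict.keys, List.map_map, Function.comp_def]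

theorem pvMapDedup_insert (d : PySem.Dict String (List String)) (k : String) (v : List String) :
    pvMapDedup (d.insert k v) = (pvMapDedup d).insert k (PySem.List.dedup v) := by
  have hc : ((d.items.map (fun p => (p.1, PySem.List.dedup p.2))).any fun p => p.1 == k)
      = (d.items.any fun p => p.1 == k) := by
    simp only [List.any_map, Function.comp_def]
  apply PySem.Dict.ext
  simp only [pvMapDedup, PySem.Dict.insert, PySem.Dict.contains, hc]
  by_cases h : (d.items.any fun p => p.1 == k) = true
  · simp only [h, if_true, List.map_map]
    apply List.map_congr_left
    intro p _
    by_cases hp : p.1 = k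
    · simp [hp]
    · simp [hp]
  · simp [h]

theorem pv_insert_eq_self (d : PySem.Dict String (List String)) (k : String) (v : List String)
    (hnd : d.keys.Nodup) (h : d.get? k = some v) : d.insert k v = d := by
  have hc : d.contains k = true := by
    rw [PySem.Dict.contains_eq_isSome_get?, h]; rfl
  apply PySem.Dict.ext
  simp only [PySem.Dict.insert, hc, if_true]
  have hkey : ∀ p ∈ d.items, p.1 = k → p = (k, v) := by
    intro p hp hpk
    have := PySem.Dict.get?_of_mem_items (d := d) (k := p.1) (v := p.2) (by exact hp) hnd
    rw [hpk, h] at this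
    cases this
    exact Prod.ext hpk rfl
  calc List.map (fun p => if (p.1 == k) = true then (k, v) else p) d.items
      = List.map id d.items := by
        apply List.map_congr_left
        intro p hp
        by_cases hpk : p.1 = k
        · simp [hkey p hp hpk]
        · simp [hpk]
    _ = d.items := List.map_id d.items

theorem pv_dedup_append_singleton (vs : List String) (m : String) :
    PySem.List.dedup (vs ++ [m]) = if m ∈ vs then PySem.List.dedup vs else PySem.List.dedup vs ++ [m] := by
  have : PySem.List.dedup (vs ++ [m]) = PySem.Set.add (PySem.List.dedup vs) m := by
    simp [PySem.List.dedup, PySem.Set.ofList, List.foldl_append]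
  rw [this]
  by_cases hm : m ∈ vs
  · simp [PySem.Set.add, hm]
  · simp [PySem.Set.add, hm]

theorem pv_fold_eq (l : List String) (d : PySem.Dict String (List String))
    (hnd : d.keys.Nodup) (hpre : ∀ s ∈ l, 3 ≤ s.toList.length) :
    l.foldl (fun dict_choices symbol =>
      let commod := PySem.Str.slice symbol (some 0) (some (-3))
      match PySem.Str.pyGet? symbol (-3) with
      | none => dict_choices
      | some mc =>
        let month := String.ofList [mc]
        match dict_choices.get? commod with
        | none => dict_choices.insert commod [month]
        | some ms => if month ∈ ms then dict_choices else dict_choices.insert commod (ms ++ [month])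
      ) (pvMapDedup d)
    = pvMapDedup (l.foldl (fun groups symbol =>
        match PySem.Str.pyGet? symbol (-3) with
        | none => groups
        | some mc =>
          groups.modify (PySem.Str.slice symbol (some 0) (some (-3))) [] (fun ms => ms ++ [String.ofList [mc]])
        ) d) := by
  induction l generalizing d with
  | nil => rfl
  | cons s rest ih =>
    have hs : 3 ≤ s.toList.length := hpre s (by simp)
    obtain ⟨mc, hmc⟩ : ∃ mc, PySem.Str.pyGet? s (-3) = some mc := by
      cases h : PySem.Str.pyGet? s (-3) with
      | none =>
        exfalso
        have := (PySem.List.pyGet?_eq_none_iff s.toList (-3)).mp (by simpa using h)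
        exact this (by unfold PySem.Raise.InRange; omega)
      | some c => exact ⟨c, rfl⟩
    simp only [List.foldl_cons, hmc]
    have hstep :
        (match (pvMapDedup d).get? (PySem.Str.slice s (some 0) (some (-3))) with
          | none => (pvMapDedup d).insert (PySem.Str.slice s (some 0) (some (-3))) [String.ofList [mc]]
          | some ms => if String.ofList [mc] ∈ ms then pvMapDedup d
              else (pvMapDedup d).insert (PySem.Str.slice s (some 0) (some (-3))) (ms ++ [String.ofList [mc]]))
        = pvMapDedup (d.modify (PySem.Str.slice s (some 0) (some (-3))) [] (fun ms => ms ++ [String.ofList [mc]])) := by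
      set c := PySem.Str.slice s (some 0) (some (-3)) with hcdef
      set m := String.ofList [mc] with hmdef
      rw [PySem.Dict.modify]
      cases hg : d.get? c with
      | none =>
        rw [pvMapDedup_get?, hg]
        rw [PySem.Dict.getD_of_get?_eq_none d [] hg]
        rw [pvMapDedup_insert]
        simp [PySem.List.dedup, PySem.Set.ofList, PySem.Set.add, PySem.Set.empty]
      | some vs =>
        rw [pvMapDedup_get?, hg]
        rw [PySem.Dict.getD_of_get?_eq_some d [] hg]
        rw [pvMapDedup_insert, pv_dedup_append_singleton]
        by_cases hm : m ∈ vs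
        · simp only [Option.map_some, hm, if_true, (PySem.List.mem_dedup vs m).mpr hm, if_true]
          exact (pv_insert_eq_self (pvMapDedup d) c (PySem.List.dedup vs)
            (by rw [pvMapDedup_keys]; exact hnd) (by rw [pvMapDedup_get?, hg]; rfl)).symm
        · have hm' : m ∉ PySem.List.dedup vs := fun hx => hm ((PySem.List.mem_dedup vs m).mp hx)
          simp only [Option.map_some, hm, if_false]
          exact if_neg hm'
    rw [hstep]
    exact ih _ (PySem.Dict.nodup_keys_insert _ _ _ hnd) (fun x hx => hpre x (by simp [hx]))

-- ===== VERDICT (by name: the statement is the Claim_ definition above) =====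
theorem symbol_list_to_dropdown_dict_py_spec : Claim_equal_symbol_list_to_dropdown_dict_py := by
  intro symbol_list _ hpre
  unfold Spec_symbol_list_to_dropdown_dict_py
  unfold symbol_list_to_dropdown_dict_py symbol_list_to_dropdown_dict_py_alt
  have h := pv_fold_eq symbol_list PySem.Dict.empty (by exact PySem.Dict.nodup_keys_empty) hpre
  have hempty : pvMapDedup PySem.Dict.empty = PySem.Dict.empty := by rfl
  rw [hempty] at h
  rw [h]
  rfl
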